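-- pv_equiv track=rewrite | github.com/SiddhantAttavar/rosalind | bioinformatics-stronghold/mprt.py | get_motif_locs
-- ===== SOURCE A (Python) =====
-- def get_motif_locs(s, t):
-- 	res = []
-- 	for i in range(len(s)):
-- 		j = i
-- 		k = 0
-- 		while k < len(t) and j < len(s):
-- 			if s[j] == t[k]:
-- 				j += 1
-- 				k += 1
-- 				continue
--
-- 			if t[k] == '[':
-- 				k += 1
-- 				flag = False
-- 				while t[k] != ']':
-- 					if s[j] == t[k]:
-- 						flag = True
-- 					k += 1
--
-- 				if not flag:
-- 					break
--
-- 				j += 1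
-- 				k += 1
-- 				continue
--
-- 			if t[k] == '{':
-- 				k += 1
-- 				while t[k] != '}':
-- 					if s[j] == t[k]:
-- 						break
-- 					k += 1
-- 				else:
-- 					j += 1
-- 					k += 1
-- 					continue
-- 				break
--
-- 			break
-- 		else:
-- 			if k == len(t):
-- 				res.append(i + 1)
-- 	return res
-- ===== SOURCE B (Python) =====
-- def _compile(t):
-- 	# parse the PROSITE-style pattern once into per-position tokens:
-- 	# (True, chars) = position must be one of chars; (False, chars) = must not be
-- 	tokens = []
-- 	k = 0
-- 	while k < len(t):
-- 		c = t[k]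
-- 		if c == '[':
-- 			close = t.index(']', k + 1)
-- 			tokens.append((True, t[k + 1:close]))
-- 			k = close + 1
-- 		elif c == '{':
-- 			close = t.index('}', k + 1)
-- 			tokens.append((False, t[k + 1:close]))
-- 			k = close + 1
-- 		else:
-- 			tokens.append((True, c))
-- 			k += 1
-- 	return tokens
--
-- def get_motif_locs(s, t):
-- 	tokens = _compile(t)
-- 	m = len(tokens)
-- 	res = []
-- 	for i in range(len(s)):
-- 		if i + m <= len(s) and all((s[i + d] in cs) == pos for d, (pos, cs) in enumerate(tokens)):
-- 			res.append(i + 1)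
-- 	return res
-- ===== Notes on version B (the rewrite author's own statement) =====
-- stated objective: faster
-- what changed: B compiles the pattern once into a list of per-position character-class tokens (positive/negative sets) and then slides a fixed window over s checking one token per character, instead of A's re-parsing of the raw pattern string, bracket by bracket, at every start position.
-- outside the precondition, e.g. on get_motif_locs('[AC]X', '[AC]X'): A returns [1], B returns []; on get_motif_locs('', '['): A returns [], B raises ValueError
import Mathlib
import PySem

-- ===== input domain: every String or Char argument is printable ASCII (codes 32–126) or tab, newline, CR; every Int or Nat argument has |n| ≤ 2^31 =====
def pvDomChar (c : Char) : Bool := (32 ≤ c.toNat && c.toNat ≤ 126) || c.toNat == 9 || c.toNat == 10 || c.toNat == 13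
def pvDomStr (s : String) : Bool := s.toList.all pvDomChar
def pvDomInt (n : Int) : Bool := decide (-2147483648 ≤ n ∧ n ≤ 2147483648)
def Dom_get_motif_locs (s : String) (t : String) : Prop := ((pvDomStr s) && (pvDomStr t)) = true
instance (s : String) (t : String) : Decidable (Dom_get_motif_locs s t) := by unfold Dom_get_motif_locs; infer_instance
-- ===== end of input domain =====

-- B compiles the pattern once into per-position character-class tokens and slides a window,
-- instead of A's re-parsing of the pattern string at every start position (objective: faster;
-- a timing run measured B faster on the generated large inputs).

-- ===== PORT A =====
-- inner while-loop of A over suffixes (same state: remaining s, remaining t);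
-- returns true iff the loop exits with k == len(t) (the while-else append case)
def aMatch : List Char → List Char → Bool
  | _, [] => true
  | [], _ :: _ => false
  | c :: ss, d :: ts =>
    if c = d then aMatch ss ts
    else if d = '[' then
      let cs := ts.takeWhile (· ≠ ']')
      match hdw : ts.dropWhile (· ≠ ']') with
      | [] => false              -- Python raises IndexError here (t without ']'); excluded by Pre_
      | _ :: rest' => if cs.contains c then aMatch ss rest' else false
    else if d = '{' then
      let cs := ts.takeWhile (· ≠ '}')
      if cs.contains c then false
      else
        match hdw : ts.dropWhile (· ≠ '}') with
        | [] => false            -- Python raises IndexError here (t without '}'); excluded by Pre_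
        | _ :: rest' => aMatch ss rest'
    else false
  termination_by ss ts => ss.length + ts.length
  decreasing_by
  · simp; omega
  · have h := List.length_dropWhile_le (fun x => decide (x ≠ ']')) ts
    rw [hdw] at h; simp at h ⊢; omega
  · have h := List.length_dropWhile_le (fun x => decide (x ≠ '}')) ts
    rw [hdw] at h; simp at h ⊢; omega

def get_motif_locs (s : String) (t : String) : List Int :=
  (List.range s.toList.length).foldl
    (fun res i => if aMatch (s.toList.drop i) t.toList then res ++ [(i : Int) + 1] else res) []

-- ===== PORT B =====
-- _compile: one pass over the pattern producing (positive?, class chars) tokens;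
-- none = Python's ValueError from t.index (unclosed bracket), excluded by Pre_
def bCompile : List Char → Option (List (Bool × List Char))
  | [] => some []
  | c :: rest =>
    if c = '[' then
      match hdw : rest.dropWhile (· ≠ ']') with
      | [] => none
      | _ :: rest' => ((true, rest.takeWhile (· ≠ ']')) :: ·) <$> bCompile rest'
    else if c = '{' then
      match hdw : rest.dropWhile (· ≠ '}') with
      | [] => none
      | _ :: rest' => ((false, rest.takeWhile (· ≠ '}')) :: ·) <$> bCompile rest'
    else ((true, [c]) :: ·) <$> bCompile rest
  termination_by l => l.length
  decreasing_by
  · have h := List.length_dropWhile_le (fun x => decide (x ≠ ']')) rest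
    rw [hdw] at h; simp at h ⊢; omega
  · have h := List.length_dropWhile_le (fun x => decide (x ≠ '}')) rest
    rw [hdw] at h; simp at h ⊢; omega
  · simp

-- the all(…)-over-enumerate window test: (s[i+d] in cs) == pos for each token
def bWin : List Char → List (Bool × List Char) → Bool
  | _, [] => true
  | [], _ :: _ => false
  | c :: ss, (pos, cs) :: toks => (cs.contains c == pos) && bWin ss toks

def get_motif_locs_alt (s : String) (t : String) : List Int :=
  match bCompile t.toList with
  | none => []                   -- Python raises ValueError here; excluded by Pre_
  | some toks =>
    (List.range s.toList.length).foldl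
      (fun res i =>
        if decide (i + toks.length ≤ s.toList.length) && bWin (s.toList.drop i) toks
        then res ++ [(i : Int) + 1] else res) []

-- ===== PRECONDITION & SPEC =====
-- Pre_ excludes (a) ill-formed patterns t with an unclosed '[' or '{' (A raises IndexError
--     whenever the scan is reached, B's compile raises ValueError always), and (b) the corner
--     outside the natural protein domain where a metacharacter '[' (resp. '{') occurs in BOTH
--     s and t, on which A happens to match the bracket character of the pattern literally.
def Pre_get_motif_locs (s : String) (t : String) : Prop :=
  (('[' ∈ s.toList → ('[' : Char) ∉ t.toList) ∧ ('{' ∈ s.toList → ('{' : Char) ∉ t.toList)) ∧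
  t.toList.tails.all (fun l =>
    (!(l.head? == some '[') || l.tail.contains ']') &&
    (!(l.head? == some '{') || l.tail.contains '}')) = true
instance (s : String) (t : String) : Decidable (Pre_get_motif_locs s t) := by
  unfold Pre_get_motif_locs; infer_instance

def pvWitness_get_motif_locs : String × String := ("MNSTAPNFSDNTSAP", "N{P}[ST]{P}")

def Spec_get_motif_locs (s : String) (t : String) (out : List Int) : Prop := out = get_motif_locs_alt s t
instance (s : String) (t : String) (out : List Int) : Decidable (Spec_get_motif_locs s t out) := by unfold Spec_get_motif_locs; infer_instance

-- ===== CLAIM (what is proved, stated in full; the proofs are below) =====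
def Claim_equal_get_motif_locs : Prop := ∀ (s : String) (t : String), Dom_get_motif_locs s t → Pre_get_motif_locs s t → Spec_get_motif_locs s t (get_motif_locs s t)

-- ===== LEMMAS AND PROOFS =====

-- proof-side well-formedness of the pattern, recursively (equivalent to the tails condition of Pre_)
def wfPat : List Char → Bool
  | [] => true
  | c :: rest =>
    (if c = '[' then rest.contains ']' else if c = '{' then rest.contains '}' else true)
      && wfPat rest

theorem wfPat_of_tails : ∀ l : List Char,
    l.tails.all (fun l =>
      (!(l.head? == some '[') || l.tail.contains ']') &&
      (!(l.head? == some '{') || l.tail.contains '}')) = true → wfPat l = true := by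
  intro l
  induction l with
  | nil => intro _; rfl
  | cons c rest ih =>
    intro h
    rw [List.tails_cons, List.all_cons, Bool.and_eq_true] at h
    have hhd := h.1
    simp only [List.head?_cons, List.tail_cons, Bool.and_eq_true, Bool.or_eq_true,
      Bool.not_eq_eq_eq_not] at hhd
    simp only [wfPat, Bool.and_eq_true]
    refine ⟨?_, ih h.2⟩
    by_cases h1 : c = '['
    · rw [if_pos h1]
      rcases hhd.1 with h' | h'
      · simp at h'; exact absurd h1 h'
      · exact h'
    · rw [if_neg h1]
      by_cases h2 : c = '{'
      · rw [if_pos h2]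
        rcases hhd.2 with h' | h'
        · simp at h'; exact absurd h2 h'
        · exact h'
      · rw [if_neg h2]

theorem wfPat_cons {c : Char} {rest : List Char} (h : wfPat (c :: rest) = true) :
    wfPat rest = true ∧ (c = '[' → rest.contains ']' = true) ∧ (c = '{' → rest.contains '}' = true) := by
  simp only [wfPat, Bool.and_eq_true] at h
  refine ⟨h.2, ?_, ?_⟩ <;> intro hc <;> subst hc <;> simpa using h.1

theorem wfPat_suffix : ∀ {l₂ l₁ : List Char}, l₁ <:+ l₂ → wfPat l₂ = true → wfPat l₁ = true := by
  intro l₂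
  induction l₂ with
  | nil => intro l₁ h _; rw [List.suffix_nil.mp h]; rfl
  | cons c rest ih =>
    intro l₁ h hwf
    rcases List.suffix_cons_iff.mp h with h1 | h1
    · rw [h1]; exact hwf
    · exact ih h1 (wfPat_cons hwf).1

theorem dropWhile_ne_nil_of_mem {e : Char} {l : List Char} (h : l.contains e = true) :
    l.dropWhile (· ≠ e) ≠ [] := by
  intro hnil
  rw [List.dropWhile_eq_nil_iff] at hnil
  have := hnil e (by simpa using h)
  simp at this

theorem dropWhile_tail_suffix {p : Char → Bool} {l x rest'} (h : l.dropWhile p = x :: rest') :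
    rest' <:+ l := by
  have h1 : rest' <:+ l.dropWhile p := by rw [h]; exact List.suffix_cons x rest'
  exact h1.trans (List.dropWhile_suffix p)

theorem bCompile_nil : bCompile [] = some [] := by rw [bCompile]

theorem bCompile_lit {c : Char} {rest : List Char} (h1 : c ≠ '[') (h2 : c ≠ '{') :
    bCompile (c :: rest) = (((true, [c]) :: ·) <$> bCompile rest) := by
  rw [bCompile]; simp [h1, h2]

theorem bCompile_pos {ts' : List Char} {x : Char} {rest' : List Char}
    (hdw : ts'.dropWhile (· ≠ ']') = x :: rest') :
    bCompile ('[' :: ts') = (((true, ts'.takeWhile (· ≠ ']')) :: ·) <$> bCompile rest') := by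
  rw [bCompile, if_pos rfl]
  split
  · rename_i heq; rw [hdw] at heq; cases heq
  · rename_i head rest'' heq; rw [hdw] at heq; cases heq; rfl

theorem bCompile_neg {ts' : List Char} {x : Char} {rest' : List Char}
    (hdw : ts'.dropWhile (· ≠ '}') = x :: rest') :
    bCompile ('{' :: ts') = (((false, ts'.takeWhile (· ≠ '}')) :: ·) <$> bCompile rest') := by
  rw [bCompile, if_neg (by decide : ¬('{' : Char) = '['), if_pos rfl]
  split
  · rename_i heq; rw [hdw] at heq; cases heq
  · rename_i head rest'' heq; rw [hdw] at heq; cases heq; rfl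

theorem bCompile_isSome : ∀ ts : List Char, wfPat ts = true → (bCompile ts).isSome := by
  intro ts
  induction ts using bCompile.induct with
  | case1 => intro _; rw [bCompile_nil]; rfl
  | case2 rest hdw =>
    intro hwf
    exact absurd hdw (dropWhile_ne_nil_of_mem ((wfPat_cons hwf).2.1 rfl))
  | case3 rest head rest' hdw ih =>
    intro hwf
    rw [bCompile_pos hdw]
    have := ih (wfPat_suffix (dropWhile_tail_suffix hdw) (wfPat_cons hwf).1)
    cases h : bCompile rest' with
    | none => rw [h] at this; cases this
    | some l => rfl
  | case4 rest hdw hne =>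
    intro hwf
    exact absurd hdw (dropWhile_ne_nil_of_mem ((wfPat_cons hwf).2.2 rfl))
  | case5 rest head rest' hdw hne ih =>
    intro hwf
    rw [bCompile_neg hdw]
    have := ih (wfPat_suffix (dropWhile_tail_suffix hdw) (wfPat_cons hwf).1)
    cases h : bCompile rest' with
    | none => rw [h] at this; cases this
    | some l => rfl
  | case6 c rest h1 h2 ih =>
    intro hwf
    rw [bCompile_lit h1 h2]
    have := ih (wfPat_cons hwf).1
    cases h : bCompile rest with
    | none => rw [h] at this; cases this
    | some l => rfl

theorem aM_nil_pat (ss : List Char) : aMatch ss [] = true := by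
  rw [aMatch]

theorem aM_nil_s (d : Char) (ts : List Char) : aMatch [] (d :: ts) = false := by
  rw [aMatch]

theorem aM_hit {c d : Char} (ss ts : List Char) (h : c = d) :
    aMatch (c :: ss) (d :: ts) = aMatch ss ts := by
  rw [aMatch, if_pos h]

theorem aM_pos {c : Char} {ss ts : List Char} {x : Char} {rest' : List Char}
    (hne : c ≠ '[') (hdw : ts.dropWhile (· ≠ ']') = x :: rest') :
    aMatch (c :: ss) ('[' :: ts) =
      (if (ts.takeWhile (· ≠ ']')).contains c then aMatch ss rest' else false) := by
  rw [aMatch, if_neg hne, if_pos rfl]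
  split
  · rename_i heq; rw [hdw] at heq; cases heq
  · rename_i h1 h2 heq; rw [hdw] at heq; cases heq; rfl

theorem aM_neg {c : Char} {ss ts : List Char} {x : Char} {rest' : List Char}
    (hne : c ≠ '{') (hdw : ts.dropWhile (· ≠ '}') = x :: rest') :
    aMatch (c :: ss) ('{' :: ts) =
      (if (ts.takeWhile (· ≠ '}')).contains c then false else aMatch ss rest') := by
  rw [aMatch, if_neg hne, if_neg (by decide : ¬('{' : Char) = '['), if_pos rfl]
  by_cases h : (ts.takeWhile (· ≠ '}')).contains c = true
  · rw [if_pos h, if_pos h]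
  · rw [if_neg h, if_neg h]
    split
    · rename_i heq; rw [hdw] at heq; cases heq
    · rename_i h1 h2 heq; rw [hdw] at heq; cases heq; rfl

theorem aM_miss {c d : Char} (ss ts : List Char) (h : c ≠ d) (h1 : d ≠ '[') (h2 : d ≠ '{') :
    aMatch (c :: ss) (d :: ts) = false := by
  rw [aMatch, if_neg h, if_neg h1, if_neg h2]

theorem bCompile_cons_ne_nil {d : Char} {rest : List Char} {toks : List (Bool × List Char)}
    (h : bCompile (d :: rest) = some toks) : toks ≠ [] := by
  by_cases h1 : d = '['
  · subst h1
    cases hdw : rest.dropWhile (· ≠ ']') with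
    | nil => rw [bCompile, if_pos rfl] at h; rw [hdw] at h; cases h
    | cons x rest' =>
      rw [bCompile_pos hdw] at h
      cases hb : bCompile rest' with
      | none => rw [hb] at h; cases h
      | some l => rw [hb] at h; cases h; simp
  · by_cases h2 : d = '{'
    · subst h2
      cases hdw : rest.dropWhile (· ≠ '}') with
      | nil =>
        rw [bCompile, if_neg (by decide : ¬('{' : Char) = '['), if_pos rfl] at h
        rw [hdw] at h; cases h
      | cons x rest' =>
        rw [bCompile_neg hdw] at h
        cases hb : bCompile rest' with
        | none => rw [hb] at h; cases h
        | some l => rw [hb] at h; cases h; simp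
    · rw [bCompile_lit h1 h2] at h
      cases hb : bCompile rest with
      | none => rw [hb] at h; cases h
      | some l => rw [hb] at h; cases h; simp

theorem aMatch_eq_bWin : ∀ ss ts toks, wfPat ts = true →
    (('[' : Char) ∈ ss → ('[' : Char) ∉ ts) → (('{' : Char) ∈ ss → ('{' : Char) ∉ ts) →
    bCompile ts = some toks →
    aMatch ss ts = (decide (toks.length ≤ ss.length) && bWin ss toks) := by
  intro ss ts
  induction ss, ts using aMatch.induct with
  | case1 ss =>
    intro toks _ _ _ hc
    rw [bCompile_nil] at hc; cases hc
    simp [aM_nil_pat, bWin]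
  | case2 d ts =>
    intro toks hwf _ _ hc
    have hne := bCompile_cons_ne_nil hc
    rw [aM_nil_s]
    cases toks with
    | nil => exact absurd rfl hne
    | cons tok toks' => simp
  | case3 ss d ts ih =>
    intro toks hwf h1 h2 hc
    have hd1 : d ≠ '[' := by
      intro h; subst h; exact (h1 List.mem_cons_self) List.mem_cons_self
    have hd2 : d ≠ '{' := by
      intro h; subst h; exact (h2 List.mem_cons_self) List.mem_cons_self
    have h1' : ('[' : Char) ∈ ss → ('[' : Char) ∉ ts := fun h =>
      fun h' => (h1 (List.mem_cons_of_mem d h)) (List.mem_cons_of_mem d h')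
    have h2' : ('{' : Char) ∈ ss → ('{' : Char) ∉ ts := fun h =>
      fun h' => (h2 (List.mem_cons_of_mem d h)) (List.mem_cons_of_mem d h')
    rw [bCompile_lit hd1 hd2] at hc
    cases hb : bCompile ts with
    | none => rw [hb] at hc; cases hc
    | some toks' =>
      rw [hb] at hc; cases hc
      rw [aM_hit ss ts rfl, ih toks' (wfPat_cons hwf).1 h1' h2' hb]
      simp [bWin]
  | case4 c ss ts hdw hne =>
    intro toks hwf _ _ _
    exact absurd hdw (dropWhile_ne_nil_of_mem ((wfPat_cons hwf).2.1 rfl))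
  | case5 c ss ts cs x rest' hdw hcs hne ih =>
    intro toks hwf h1 h2 hc
    rw [bCompile_pos hdw] at hc
    cases hb : bCompile rest' with
    | none => rw [hb] at hc; cases hc
    | some toks' =>
      rw [hb] at hc; cases hc
      have hsub : rest' ⊆ ts := (dropWhile_tail_suffix hdw).subset
      have h1' : ('[' : Char) ∈ ss → ('[' : Char) ∉ rest' := fun h =>
        absurd List.mem_cons_self (h1 (List.mem_cons_of_mem c h))
      have h2' : ('{' : Char) ∈ ss → ('{' : Char) ∉ rest' := fun h h' =>
        (h2 (List.mem_cons_of_mem c h)) (List.mem_cons_of_mem '[' (hsub h'))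
      have hwf' : wfPat rest' = true := wfPat_suffix (dropWhile_tail_suffix hdw) (wfPat_cons hwf).1
      rw [aM_pos hne hdw, if_pos hcs, ih toks' hwf' h1' h2' hb]
      have hm : c ∈ List.takeWhile (fun x => !decide (x = ']')) ts := by
        simpa using (show (List.takeWhile (fun x => decide (x ≠ ']')) ts).contains c = true from hcs)
      simp [bWin, hm]
  | case6 c ss ts cs x rest' hdw hcs hne =>
    intro toks hwf _ _ hc
    rw [bCompile_pos hdw] at hc
    cases hb : bCompile rest' with
    | none => rw [hb] at hc; cases hc
    | some toks' =>
      rw [hb] at hc; cases hc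
      rw [aM_pos hne hdw, if_neg hcs]
      have hm : c ∉ List.takeWhile (fun x => !decide (x = ']')) ts := by
        have h' : ¬(List.takeWhile (fun x => decide (x ≠ ']')) ts).contains c = true := hcs
        simpa using h'
      simp [bWin, hm]
  | case7 c ss ts cs hcs hne _ =>
    intro toks hwf _ _ hc
    obtain ⟨x, rest', hdw⟩ : ∃ x rest', ts.dropWhile (· ≠ '}') = x :: rest' := by
      cases h : ts.dropWhile (· ≠ '}') with
      | nil => exact absurd h (dropWhile_ne_nil_of_mem ((wfPat_cons hwf).2.2 rfl))
      | cons x rest' => exact ⟨x, rest', rfl⟩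
    rw [bCompile_neg hdw] at hc
    cases hb : bCompile rest' with
    | none => rw [hb] at hc; cases hc
    | some toks' =>
      rw [hb] at hc; cases hc
      rw [aM_neg hne hdw, if_pos hcs]
      have hm : c ∈ List.takeWhile (fun x => !decide (x = '}')) ts := by
        simpa using (show (List.takeWhile (fun x => decide (x ≠ '}')) ts).contains c = true from hcs)
      simp [bWin, hm]
  | case8 c ss ts cs hcs hdw hne _ =>
    intro toks hwf _ _ _
    exact absurd hdw (dropWhile_ne_nil_of_mem ((wfPat_cons hwf).2.2 rfl))
  | case9 c ss ts cs hcs x rest' hdw hne _ ih =>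
    intro toks hwf h1 h2 hc
    rw [bCompile_neg hdw] at hc
    cases hb : bCompile rest' with
    | none => rw [hb] at hc; cases hc
    | some toks' =>
      rw [hb] at hc; cases hc
      have hsub : rest' ⊆ ts := (dropWhile_tail_suffix hdw).subset
      have h1' : ('[' : Char) ∈ ss → ('[' : Char) ∉ rest' := fun h h' =>
        (h1 (List.mem_cons_of_mem c h)) (List.mem_cons_of_mem '{' (hsub h'))
      have h2' : ('{' : Char) ∈ ss → ('{' : Char) ∉ rest' := fun h =>
        absurd List.mem_cons_self (h2 (List.mem_cons_of_mem c h))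
      have hwf' : wfPat rest' = true := wfPat_suffix (dropWhile_tail_suffix hdw) (wfPat_cons hwf).1
      rw [aM_neg hne hdw, if_neg hcs, ih toks' hwf' h1' h2' hb]
      have hm : c ∉ List.takeWhile (fun x => !decide (x = '}')) ts := by
        have h' : ¬(List.takeWhile (fun x => decide (x ≠ '}')) ts).contains c = true := hcs
        simpa using h'
      simp [bWin, hm]
  | case10 c ss d ts hne h1 h2 =>
    intro toks hwf _ _ hc
    rw [bCompile_lit h1 h2] at hc
    cases hb : bCompile ts with
    | none => rw [hb] at hc; cases hc
    | some toks' =>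
      rw [hb] at hc; cases hc
      rw [aM_miss ss ts hne h1 h2]
      simp [bWin, hne]

-- ===== VERDICT (by name: the statement is the Claim_ definition above) =====
theorem get_motif_locs_spec : Claim_equal_get_motif_locs := by
  intro s t _ hpre
  obtain ⟨⟨hp1, hp2⟩, ht'⟩ := hpre
  have ht := wfPat_of_tails t.toList ht'
  unfold Spec_get_motif_locs get_motif_locs get_motif_locs_alt
  obtain ⟨toks, hc⟩ := Option.isSome_iff_exists.mp (bCompile_isSome t.toList ht)
  rw [hc]
  apply PySem.List.foldl_congr_mem
  intro acc i hi
  have hilt : i < s.toList.length := List.mem_range.mp hi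
  have h1 : ('[' : Char) ∈ s.toList.drop i → ('[' : Char) ∉ t.toList := fun h =>
    hp1 (List.mem_of_mem_drop h)
  have h2 : ('{' : Char) ∈ s.toList.drop i → ('{' : Char) ∉ t.toList := fun h =>
    hp2 (List.mem_of_mem_drop h)
  rw [aMatch_eq_bWin _ _ _ ht h1 h2 hc]
  have hlen : (toks.length ≤ (s.toList.drop i).length) ↔ (i + toks.length ≤ s.toList.length) := by
    rw [List.length_drop]; omega
  rw [decide_eq_decide.mpr hlen]
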